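-- pv_equiv track=rewrite | github.com/dhanashree-nangre/Python_2544403 | abb.py | get_word_at_index
-- ===== SOURCE A (Python) =====
-- def get_word_at_index(sentence, index):
--     words = sentence.split()
--     current_index = 0
--
--     for word in words:
--         word_length = len(word)
--         if current_index + word_length > index:
--             return word,current_index
--         current_index += word_length + 1  # +1 for the space between words
--
--     return None
-- ===== SOURCE B (Python) =====
-- def get_word_at_index(sentence, index):
--     words = sentence.split()
--     # table of cumulative word-start offsets (single-space-join semantics)
--     starts = []
--     pos = 0
--     for w in words:
--         starts.append(pos)
--         pos += len(w) + 1
--     ends = [s + len(w) for s, w in zip(starts, words)]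
--     # ends is strictly increasing: binary search the first i with ends[i] > index
--     lo, hi = 0, len(words)
--     while lo < hi:
--         mid = (lo + hi) // 2
--         if ends[mid] > index:
--             hi = mid
--         else:
--             lo = mid + 1
--     if lo == len(words):
--         return None
--     return words[lo], starts[lo]
-- ===== Notes on version B (the rewrite author's own statement) =====
-- stated objective: alternative
-- what changed: B precomputes a table of cumulative word-start offsets and the corresponding word-end offsets, then binary-searches that table for the first word whose end exceeds the index, instead of A's linear scan with a running offset accumulator.
import Mathlib
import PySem

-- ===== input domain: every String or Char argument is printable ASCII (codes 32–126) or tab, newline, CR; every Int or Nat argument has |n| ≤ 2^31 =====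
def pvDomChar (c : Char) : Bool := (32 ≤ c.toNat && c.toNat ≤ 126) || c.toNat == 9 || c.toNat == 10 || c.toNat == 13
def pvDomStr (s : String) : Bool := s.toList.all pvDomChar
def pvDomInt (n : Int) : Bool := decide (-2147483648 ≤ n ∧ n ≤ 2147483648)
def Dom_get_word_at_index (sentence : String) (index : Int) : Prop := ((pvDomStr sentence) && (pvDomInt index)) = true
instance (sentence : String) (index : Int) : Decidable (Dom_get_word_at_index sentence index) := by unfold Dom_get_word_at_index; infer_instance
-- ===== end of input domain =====

-- B replaces A's linear scan with a cumulative offset/end table plus a binary search over it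
-- (alternative decomposition; same single-space-join offset semantics, proved equal on all inputs).

-- ===== PORT A =====
-- A's for-loop over the words, carrying current_index
def pvAGo (words : List String) (index : Int) (current : Int) : Option (String × Int) :=
  match words with
  | [] => none
  | w :: ws =>
    let wl := PySem.Str.len w
    if current + wl > index then some (w, current)
    else pvAGo ws index (current + wl + 1)

def get_word_at_index (sentence : String) (index : Int) : Option (String × Int) :=
  pvAGo (PySem.Str.split₀ sentence) index 0

-- ===== PORT B =====
-- Source B's first loop: the table of cumulative word-start offsets
def pvStarts (words : List String) (pos : Int) : List Int :=
  match words with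
  | [] => []
  | w :: ws => pos :: pvStarts ws (pos + PySem.Str.len w + 1)

-- Source B's while-loop binary search: first i with ends[i] > index
-- (getD is exact here: mid < hi ≤ ends.length on every call)
def pvBSearch (ends : List Int) (index : Int) (lo hi : Nat) : Nat :=
  if h : lo < hi then
    if ends.getD ((lo + hi) / 2) 0 > index then pvBSearch ends index lo ((lo + hi) / 2)
    else pvBSearch ends index ((lo + hi) / 2 + 1) hi
  else lo
termination_by hi - lo
decreasing_by all_goals omega

def get_word_at_index_alt (sentence : String) (index : Int) : Option (String × Int) :=
  let words := PySem.Str.split₀ sentence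
  let starts := pvStarts words 0
  let ends := List.zipWith (fun s w => s + PySem.Str.len w) starts words
  let lo := pvBSearch ends index 0 words.length
  if lo = words.length then none
  else some (words.getD lo "", starts.getD lo 0)  -- getD exact: lo < words.length here

-- ===== PRECONDITION & SPEC =====
def Spec_get_word_at_index (sentence : String) (index : Int) (out : Option (String × Int)) : Prop := out = get_word_at_index_alt sentence index
instance (sentence : String) (index : Int) (out : Option (String × Int)) : Decidable (Spec_get_word_at_index sentence index out) := by unfold Spec_get_word_at_index; infer_instance

-- ===== CLAIM (what is proved, stated in full; the proofs are below) =====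
def Claim_equal_get_word_at_index : Prop := ∀ (sentence : String) (index : Int), Dom_get_word_at_index sentence index → Spec_get_word_at_index sentence index (get_word_at_index sentence index)

-- ===== LEMMAS AND PROOFS =====

theorem pv_len_nonneg (w : String) : 0 ≤ PySem.Str.len w := by
  simp [PySem.Str.len_eq]

theorem pvStarts_length (ws : List String) (pos : Int) :
    (pvStarts ws pos).length = ws.length := by
  induction ws generalizing pos with
  | nil => simp [pvStarts]
  | cons w ws ih => simp [pvStarts, ih]

-- every end in the table built from offset pos is at least pos
theorem pv_ends_lb (ws : List String) (pos : Int) (x : Int)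
    (hx : x ∈ List.zipWith (fun s w => s + PySem.Str.len w) (pvStarts ws pos) ws) :
    pos ≤ x := by
  induction ws generalizing pos with
  | nil => simp [pvStarts] at hx
  | cons w ws ih =>
    simp only [pvStarts, List.zipWith_cons_cons, List.mem_cons] at hx
    rcases hx with h | h
    · have := pv_len_nonneg w; omega
    · have := ih (pos + PySem.Str.len w + 1) h
      have := pv_len_nonneg w; omega

-- the end table is strictly increasing
theorem pv_ends_pairwise (ws : List String) (pos : Int) :
    (List.zipWith (fun s w => s + PySem.Str.len w) (pvStarts ws pos) ws).Pairwise (· < ·) := by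
  induction ws generalizing pos with
  | nil => simp [pvStarts]
  | cons w ws ih =>
    simp only [pvStarts, List.zipWith_cons_cons]
    refine List.Pairwise.cons (fun x hx => ?_) (ih _)
    have := pv_ends_lb ws (pos + PySem.Str.len w + 1) x hx
    omega

theorem pv_ends_mono (ends : List Int) (hp : ends.Pairwise (· < ·))
    {i j : Nat} (hij : i ≤ j) (hj : j < ends.length) :
    ends.getD i 0 ≤ ends.getD j 0 := by
  rcases Nat.lt_or_ge i j with h | h
  · have hi : i < ends.length := lt_trans h hj
    rw [List.getD_eq_getElem ends 0 hi, List.getD_eq_getElem ends 0 hj]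
    exact le_of_lt ((List.pairwise_iff_getElem.mp hp) i j hi hj h)
  · have : i = j := le_antisymm hij h
    subst this; rfl

-- binary-search correctness: result is the first index with ends[i] > idx
theorem pv_bsearch_spec (ends : List Int) (idx : Int)
    (mono : ∀ i j : Nat, i ≤ j → j < ends.length → ends.getD i 0 ≤ ends.getD j 0) :
    ∀ (k lo hi : Nat), hi - lo ≤ k → hi ≤ ends.length → lo ≤ hi →
    (∀ i, i < lo → ¬ ends.getD i 0 > idx) →
    (∀ i, hi ≤ i → i < ends.length → ends.getD i 0 > idx) →
    (∀ i, i < pvBSearch ends idx lo hi → ¬ ends.getD i 0 > idx) ∧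
    (pvBSearch ends idx lo hi < ends.length → ends.getD (pvBSearch ends idx lo hi) 0 > idx) ∧
    pvBSearch ends idx lo hi ≤ ends.length := by
  intro k
  induction k with
  | zero =>
    intro lo hi hk hhn hlh hlo hhi
    have : lo = hi := by omega
    subst this
    rw [pvBSearch]
    simp only [lt_irrefl, dite_false]
    exact ⟨hlo, fun h => hhi lo (le_refl _) h, hlh.trans hhn⟩
  | succ k ih =>
    intro lo hi hk hhn hlh hlo hhi
    rw [pvBSearch]
    by_cases h : lo < hi
    · simp only [h, dite_true]
      by_cases hm : ends.getD ((lo + hi) / 2) 0 > idx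
      · simp only [hm, if_true]
        refine ih lo ((lo + hi) / 2) (by omega) (by omega) (by omega) hlo ?_
        intro i hmi hin
        exact lt_of_lt_of_le hm (mono _ _ hmi hin)
      · simp only [hm, if_false]
        refine ih ((lo + hi) / 2 + 1) hi (by omega) hhn (by omega) ?_ hhi
        intro i hi1
        have him : i ≤ (lo + hi) / 2 := by omega
        have hmn : (lo + hi) / 2 < ends.length := by omega
        have := mono i _ him hmn
        omega
    · simp only [h, dite_false]
      have : lo = hi := by omega
      subst this
      exact ⟨hlo, fun hl => hhi lo (le_refl _) hl, hlh.trans hhn⟩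

-- find? of a list whose first satisfying position is r
theorem pv_find?_of_first {α : Type} (q : α → Bool) :
    ∀ (l : List α) (r : Nat), r ≤ l.length →
    (∀ i (hi : i < l.length), i < r → q l[i] = false) →
    (∀ hr : r < l.length, q l[r] = true) →
    l.find? q = if hr : r < l.length then some l[r] else none := by
  intro l
  induction l with
  | nil =>
    intro r hr _ _
    simp
  | cons a l ih =>
    intro r hr h1 h2
    cases r with
    | zero =>
      have ha : q a = true := h2 (by simp)
      simp [List.find?, ha]
    | succ r =>
      have ha : q a = false := h1 0 (by simp) (Nat.succ_pos r)
      have hrec := ih r (by simpa using hr)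
        (fun i hi hir => by simpa using h1 (i + 1) (by simpa using hi) (by omega))
        (fun hrl => by simpa using h2 (by simpa using hrl))
      rw [List.find?, ha]
      simp only [hrec]
      by_cases hrl : r < l.length
      · simp [hrl]
      · simp [hrl]

-- A's loop is find? over the words zipped with their start offsets
theorem pvAGo_eq_find? (ws : List String) (idx : Int) :
    ∀ pos, pvAGo ws idx pos =
      (ws.zip (pvStarts ws pos)).find? (fun p => decide (p.2 + PySem.Str.len p.1 > idx)) := by
  induction ws with
  | nil => intro pos; simp [pvAGo, pvStarts]
  | cons w ws ih =>
    intro pos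
    rw [pvAGo]
    simp only [pvStarts, List.zip_cons_cons]
    by_cases h : pos + PySem.Str.len w > idx
    · rw [if_pos h, List.find?_cons_of_pos (by simpa using h)]
    · rw [if_neg h, List.find?_cons_of_neg (by simpa using h), ih]

-- the whole equivalence, stated over the word list
theorem pv_main (ws : List String) (idx : Int) :
    pvAGo ws idx 0 =
      (if pvBSearch (List.zipWith (fun s w => s + PySem.Str.len w) (pvStarts ws 0) ws) idx 0 ws.length = ws.length
       then none
       else some (ws.getD (pvBSearch (List.zipWith (fun s w => s + PySem.Str.len w) (pvStarts ws 0) ws) idx 0 ws.length) "",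
                  (pvStarts ws 0).getD (pvBSearch (List.zipWith (fun s w => s + PySem.Str.len w) (pvStarts ws 0) ws) idx 0 ws.length) 0)) := by
  set starts := pvStarts ws 0 with hstarts
  set ends := List.zipWith (fun s w => s + PySem.Str.len w) starts ws with hends
  have hsl : starts.length = ws.length := pvStarts_length ws 0
  have hel : ends.length = ws.length := by
    rw [hends, List.length_zipWith, hsl, min_self]
  have hmono : ∀ i j : Nat, i ≤ j → j < ends.length → ends.getD i 0 ≤ ends.getD j 0 :=
    fun i j hij hj => pv_ends_mono ends (pv_ends_pairwise ws 0) hij hj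
  set r := pvBSearch ends idx 0 ws.length with hr
  obtain ⟨hb1, hb2, hb3⟩ :=
    pv_bsearch_spec ends idx hmono ws.length 0 ws.length (by omega) (by omega) (by omega)
      (by omega) (by intro i h1 h2; omega)
  have hzl : (ws.zip starts).length = ws.length := by
    rw [List.length_zip, hsl, min_self]
  have hgetE : ∀ i (h : i < ws.length),
      ends.getD i 0 = starts.getD i 0 + PySem.Str.len (ws.getD i "") := by
    intro i h
    have h1 : i < starts.length := by omega
    have h2 : i < ends.length := by omega
    rw [List.getD_eq_getElem ends 0 h2, List.getD_eq_getElem starts 0 h1,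
      List.getD_eq_getElem ws "" h]
    simp only [hends, List.getElem_zipWith]
  have hfind := pv_find?_of_first (fun p : String × Int => decide (p.2 + PySem.Str.len p.1 > idx))
      (ws.zip starts) r (by omega)
      (by
        intro i hi hir
        have hiw : i < ws.length := by omega
        have hx := hb1 i hir
        rw [hgetE i hiw, List.getD_eq_getElem starts 0 (by omega),
          List.getD_eq_getElem ws "" hiw] at hx
        rw [List.getElem_zip]
        simpa using hx)
      (by
        intro hrl
        have hrw : r < ws.length := by omega
        have hx := hb2 (by omega)
        rw [hgetE r hrw, List.getD_eq_getElem starts 0 (by omega),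
          List.getD_eq_getElem ws "" hrw] at hx
        rw [List.getElem_zip]
        simpa using hx)
  rw [pvAGo_eq_find? ws idx 0, ← hstarts, hfind]
  by_cases hrn : r < ws.length
  · rw [dif_pos (by omega : r < (ws.zip starts).length), if_neg (by omega : ¬ r = ws.length),
      List.getElem_zip, List.getD_eq_getElem ws "" hrn,
      List.getD_eq_getElem starts 0 (by omega)]
  · rw [dif_neg (by omega : ¬ r < (ws.zip starts).length), if_pos (by omega : r = ws.length)]

-- ===== VERDICT (by name: the statement is the Claim_ definition above) =====
theorem get_word_at_index_spec : Claim_equal_get_word_at_index := by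
  intro sentence index _
  unfold Spec_get_word_at_index get_word_at_index get_word_at_index_alt
  exact pv_main (PySem.Str.split₀ sentence) index
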